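-- pv_equiv track=rewrite | github.com/xorkevin/advent2015 | advent11.py | has_double
-- ===== SOURCE A (Python) =====
-- def has_double(phrase):
--     l = len(phrase)
--     if l < 4:
--         return False
--
--     i = 1
--     a = 0
--     while i < l:
--         if phrase[i] == phrase[i-1]:
--             a += 1
--             i += 1
--         if a > 1:
--             return True
--         i += 1
--
--     return False
-- ===== SOURCE B (Python) =====
-- def has_double(phrase):
--     pairs = [i for i in range(1, len(phrase)) if phrase[i] == phrase[i - 1]]
--     count = 0
--     last = -2
--     for idx in pairs:
--         if idx >= last + 2:
--             count += 1
--             last = idx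
--             if count == 2:
--                 return True
--     return False
-- ===== Notes on version B (the rewrite author's own statement) =====
-- stated objective: alternative
-- what changed: B splits A's fused while-loop into two phases: one pass collecting all adjacent-equal indices, then a greedy non-overlapping selection over that list (A's redundant len<4 guard is dropped).
import Mathlib
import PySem

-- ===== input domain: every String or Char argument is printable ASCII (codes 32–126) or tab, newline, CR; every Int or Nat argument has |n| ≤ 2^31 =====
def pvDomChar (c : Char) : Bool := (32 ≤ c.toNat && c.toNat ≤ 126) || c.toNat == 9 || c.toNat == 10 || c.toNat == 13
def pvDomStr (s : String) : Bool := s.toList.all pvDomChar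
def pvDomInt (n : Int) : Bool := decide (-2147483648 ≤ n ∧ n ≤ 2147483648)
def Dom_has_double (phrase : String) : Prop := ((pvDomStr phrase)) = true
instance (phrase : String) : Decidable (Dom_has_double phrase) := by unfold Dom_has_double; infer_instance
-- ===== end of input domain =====

-- B restructures A's fused while-loop into two phases (collect adjacent-equal indices, then
-- greedily select non-overlapping ones); objective: alternative decomposition, same cost.

-- ===== PORT A =====
-- A's while-loop: i is the scan index, a the count of non-overlapping doubles found so far.
def hdLoopA (cs : List Char) (l : Nat) (i a : Nat) : Bool :=
  if _h : i < l then
    if cs.getD i ' ' = cs.getD (i - 1) ' ' then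
      -- a += 1; i += 1; if a > 1: return True; i += 1
      if a + 1 > 1 then true else hdLoopA cs l (i + 2) (a + 1)
    else
      if a > 1 then true else hdLoopA cs l (i + 1) a
  else false
termination_by l - i
decreasing_by all_goals omega

def has_double (phrase : String) : Bool :=
  let cs := phrase.toList
  let l := cs.length
  if l < 4 then false
  else hdLoopA cs l 1 0

-- ===== PORT B =====
-- B's for-loop over the collected pair indices, with (count, last) state.
def hdLoopB (lst : List Nat) (count : Nat) (last : Int) : Bool :=
  match lst with
  | [] => false
  | idx :: rest =>
    if (idx : Int) ≥ last + 2 then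
      if count + 1 = 2 then true else hdLoopB rest (count + 1) (idx : Int)
    else hdLoopB rest count last

def has_double_alt (phrase : String) : Bool :=
  let cs := phrase.toList
  let pairs := (List.range' 1 (cs.length - 1)).filter
    (fun i => cs.getD i ' ' == cs.getD (i - 1) ' ')
  hdLoopB pairs 0 (-2)

-- ===== PRECONDITION & SPEC =====
def Spec_has_double (phrase : String) (out : Bool) : Prop := out = has_double_alt phrase
instance (phrase : String) (out : Bool) : Decidable (Spec_has_double phrase out) := by unfold Spec_has_double; infer_instance

-- ===== CLAIM (what is proved, stated in full; the proofs are below) =====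
def Claim_equal_has_double : Prop := ∀ (phrase : String), Dom_has_double phrase → Spec_has_double phrase (has_double phrase)

-- ===== LEMMAS AND PROOFS =====

-- Proof-only helper: the list of indices i (from position i on) with cs[i] = cs[i-1].
def hdPairsFrom (cs : List Char) (l : Nat) (i : Nat) : List Nat :=
  if _h : i < l then
    if cs.getD i ' ' = cs.getD (i - 1) ' ' then i :: hdPairsFrom cs l (i + 1)
    else hdPairsFrom cs l (i + 1)
  else []
termination_by l - i
decreasing_by all_goals omega

lemma hdPairsFrom_nil (cs : List Char) (l i : Nat) (h : l ≤ i) :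
    hdPairsFrom cs l i = [] := by
  rw [hdPairsFrom]; simp [Nat.not_lt.mpr h]

lemma hdPairs_eq (cs : List Char) (l : Nat) :
    ∀ k i, l - i ≤ k →
      (List.range' i (l - i)).filter
        (fun j => cs.getD j ' ' == cs.getD (j - 1) ' ') = hdPairsFrom cs l i := by
  intro k
  induction k with
  | zero =>
    intro i h
    have : l ≤ i := by omega
    rw [hdPairsFrom_nil cs l i this]
    have : l - i = 0 := by omega
    simp [this]
  | succ k ih =>
    intro i h
    by_cases hi : i < l
    · have hli : l - i = (l - (i + 1)) + 1 := by omega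
      rw [hdPairsFrom, dif_pos hi, hli, List.range'_succ, List.filter_cons]
      by_cases hm : cs.getD i ' ' = cs.getD (i - 1) ' '
      · simp only [hm, beq_self_eq_true, if_true]
        rw [ih (i + 1) (by omega)]
      · simp only [if_neg hm]
        have : (cs.getD i ' ' == cs.getD (i - 1) ' ') = false := by
          simpa using hm
        simp only [this, Bool.false_eq_true, if_false]
        rw [ih (i + 1) (by omega)]
    · have : l ≤ i := by omega
      rw [hdPairsFrom_nil cs l i this]
      have : l - i = 0 := by omega
      simp [this]

-- After selecting a pair at index i, the pair at i+1 (if any) is skipped by B's greedy test.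
lemma hdSkip (cs : List Char) (l : Nat) (i : Nat) (c : Nat) :
    hdLoopB (hdPairsFrom cs l (i + 1)) c (i : Int)
      = hdLoopB (hdPairsFrom cs l (i + 2)) c (i : Int) := by
  rw [hdPairsFrom]
  by_cases hi : i + 1 < l
  · rw [dif_pos hi]
    by_cases hm : cs.getD (i + 1) ' ' = cs.getD (i + 1 - 1) ' '
    · rw [if_pos hm]
      show hdLoopB ((i + 1) :: hdPairsFrom cs l (i + 2)) c (i : Int) = _
      rw [hdLoopB]
      rw [if_neg (by push_cast; omega)]
    · rw [if_neg hm]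
  · rw [dif_neg hi]
    rw [hdPairsFrom_nil cs l (i + 2) (by omega)]

-- Main invariant: B's greedy loop over the remaining pairs equals A's scan from index i.
lemma hdMain (cs : List Char) (l : Nat) :
    ∀ k i a (last : Int), l - i ≤ k → a ≤ 1 → last + 2 ≤ (i : Int) →
      hdLoopB (hdPairsFrom cs l i) a last = hdLoopA cs l i a := by
  intro k
  induction k with
  | zero =>
    intro i a last h _ _
    have hli : l ≤ i := by omega
    rw [hdPairsFrom_nil cs l i hli, hdLoopA, dif_neg (by omega)]
    rfl
  | succ k ih =>
    intro i a last h ha hlast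
    by_cases hi : i < l
    · rw [hdPairsFrom, dif_pos hi, hdLoopA, dif_pos hi]
      by_cases hm : cs.getD i ' ' = cs.getD (i - 1) ' '
      · rw [if_pos hm, if_pos hm, hdLoopB, if_pos (by exact_mod_cast hlast)]
        interval_cases a
        · -- a = 0 : recurse with new last = i
          simp only [Nat.zero_add]
          rw [if_neg (by omega), if_neg (by omega), hdSkip,
            ih (i + 2) 1 (i : Int) (by omega) (by omega) (by push_cast; omega)]
        · -- a = 1 : both return true
          simp
      · rw [if_neg hm, if_neg hm, if_neg (by omega)]
        exact ih (i + 1) a last (by omega) ha (by push_cast; omega)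
    · rw [hdPairsFrom_nil cs l i (by omega), hdLoopA, dif_neg hi]
      rfl

-- With fewer than 4 characters A's scan can never find two non-overlapping doubles.
lemma hdLoopA_ge (cs : List Char) (l i a : Nat) (h : l ≤ i) : hdLoopA cs l i a = false := by
  rw [hdLoopA, dif_neg (by omega)]

lemma hdLoopA_one (cs : List Char) (l i : Nat) (h : l ≤ i + 1) : hdLoopA cs l i 0 = false := by
  rw [hdLoopA]
  by_cases hi : i < l
  · rw [dif_pos hi]
    by_cases hm : cs.getD i ' ' = cs.getD (i - 1) ' '
    · rw [if_pos hm, if_neg (by omega), hdLoopA_ge cs l (i + 2) 1 (by omega)]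
    · rw [if_neg hm, if_neg (by omega), hdLoopA_ge cs l (i + 1) 0 (by omega)]
  · rw [dif_neg hi]

lemma hdLoopA_two (cs : List Char) (l i : Nat) (h : l ≤ i + 2) : hdLoopA cs l i 0 = false := by
  rw [hdLoopA]
  by_cases hi : i < l
  · rw [dif_pos hi]
    by_cases hm : cs.getD i ' ' = cs.getD (i - 1) ' '
    · rw [if_pos hm, if_neg (by omega), hdLoopA_ge cs l (i + 2) 1 (by omega)]
    · rw [if_neg hm, if_neg (by omega), hdLoopA_one cs l (i + 1) (by omega)]
  · rw [dif_neg hi]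

-- ===== VERDICT (by name: the statement is the Claim_ definition above) =====
theorem has_double_spec : Claim_equal_has_double := by
  intro phrase _
  unfold Spec_has_double
  show has_double phrase = has_double_alt phrase
  set cs := phrase.toList with hcs
  set l := cs.length with hl
  show (if l < 4 then false else hdLoopA cs l 1 0)
      = hdLoopB ((List.range' 1 (l - 1)).filter
          (fun i => cs.getD i ' ' == cs.getD (i - 1) ' ')) 0 (-2)
  rw [hdPairs_eq cs l (l - 1) 1 (by omega)]
  rw [hdMain cs l l 1 0 (-2) (by omega) (by omega) (by omega)]
  by_cases h4 : l < 4
  · rw [if_pos h4, hdLoopA_two cs l 1 (by omega)]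
  · rw [if_neg h4]
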